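-- pv_equiv track=rewrite | github.com/MasterSamurai/Personal_Projects | Project_Euler/ProjectEulerProblem32.py | containsAllDigitsOnce
-- ===== SOURCE A (Python) =====
-- def containsAllDigitsOnce(num):
--     digits = []
--     for digit in [int(x) for x in str(num)]:
--         if digit == 0:
--             return False
--         if digit not in digits:
--             digits.append(digit)
--         else:
--             return False
--     for digit in range(1,10):
--         if digits.count(digit) != 1:
--             return False
--     return True
-- ===== SOURCE B (Python) =====
-- def containsAllDigitsOnce(num):
--     return sorted(int(x) for x in str(num)) == list(range(1, 10))
-- ===== Notes on version B (the rewrite author's own statement) =====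
-- stated objective: simpler
-- what changed: Replaced the membership-scan loop that builds a dedup list plus a second counting pass with a single sort of the digit list compared once against [1..9].
import Mathlib
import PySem

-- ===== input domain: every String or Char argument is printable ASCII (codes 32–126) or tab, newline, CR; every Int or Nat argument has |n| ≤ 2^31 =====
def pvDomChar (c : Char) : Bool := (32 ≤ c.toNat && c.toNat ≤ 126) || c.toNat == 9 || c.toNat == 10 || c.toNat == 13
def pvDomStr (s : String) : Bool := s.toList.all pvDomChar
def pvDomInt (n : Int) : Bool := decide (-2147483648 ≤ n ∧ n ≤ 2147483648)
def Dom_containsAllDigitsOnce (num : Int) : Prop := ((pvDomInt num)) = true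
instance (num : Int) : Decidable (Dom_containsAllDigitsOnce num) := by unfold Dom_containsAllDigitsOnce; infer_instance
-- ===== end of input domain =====

-- B replaces A's membership-scan + second counting pass with one sort of the digit list
-- compared against [1..9] (objective: simpler).


-- ===== PORT A =====
-- first loop of A: early-return False on a 0 digit or a repeated digit, else collect digits
def goA : List Int → List Int → Option (List Int)
  | [], digits => some digits
  | d :: rest, digits =>
    if d = 0 then none
    else if digits.contains d then none
    else goA rest (digits ++ [d])

def containsAllDigitsOnce (num : Int) : Bool :=
  -- [int(x) for x in str(num)]; int(x) via ofChars? is none exactly where Python raises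
  -- ValueError (the '-' of a negative num) — those inputs are excluded by Pre_ below
  match goA ((PySem.Int.toChars num).map fun c => (PySem.Int.ofChars? [c]).getD 0) [] with
  | none => false
  | some digits =>
      -- second loop: for digit in range(1,10): if digits.count(digit) != 1: return False
      (PySem.List.pyRange 1 10 1).all fun d => PySem.List.count digits d == 1

-- ===== PORT B =====
def containsAllDigitsOnce_alt (num : Int) : Bool :=
  -- sorted(int(x) for x in str(num)) == list(range(1, 10))
  PySem.List.sorted ((PySem.Int.toChars num).map fun c => (PySem.Int.ofChars? [c]).getD 0)
      (fun x => x) false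
    == PySem.List.pyRange 1 10 1

-- ===== PRECONDITION & SPEC =====
-- Pre_ excludes exactly the negative inputs, where both A and B raise ValueError (int of the sign character)
def Pre_containsAllDigitsOnce (num : Int) : Prop := 0 ≤ num
instance (num : Int) : Decidable (Pre_containsAllDigitsOnce num) := by
  unfold Pre_containsAllDigitsOnce; infer_instance
def pvWitness_containsAllDigitsOnce : Int := 123456789

def Spec_containsAllDigitsOnce (num : Int) (out : Bool) : Prop := out = containsAllDigitsOnce_alt num
instance (num : Int) (out : Bool) : Decidable (Spec_containsAllDigitsOnce num out) := by
  unfold Spec_containsAllDigitsOnce; infer_instance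

-- ===== CLAIM (what is proved, stated in full; the proofs are below) =====
def Claim_equal_containsAllDigitsOnce : Prop :=
  ∀ (num : Int), Dom_containsAllDigitsOnce num → Pre_containsAllDigitsOnce num →
    Spec_containsAllDigitsOnce num (containsAllDigitsOnce num)

-- ===== LEMMAS AND PROOFS =====

-- every char produced by Nat.toDigitsCore (beyond the accumulator) is a digitChar
lemma mem_toDigitsCore {c : Char} :
    ∀ (fuel n : Nat) (acc : List Char), c ∈ Nat.toDigitsCore 10 fuel n acc →
      c ∈ acc ∨ ∃ k, k < 10 ∧ c = Nat.digitChar k := by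
  intro fuel
  induction fuel with
  | zero => intro n acc h; exact Or.inl h
  | succ fuel ih =>
    intro n acc h
    rw [show Nat.toDigitsCore 10 (fuel+1) n acc
        = (if n / 10 = 0 then (n % 10).digitChar :: acc
           else Nat.toDigitsCore 10 fuel (n / 10) ((n % 10).digitChar :: acc)) from rfl] at h
    by_cases hq : n / 10 = 0
    · rw [if_pos hq] at h
      rcases List.mem_cons.mp h with h | h
      · exact Or.inr ⟨n % 10, Nat.mod_lt _ (by norm_num), h⟩
      · exact Or.inl h
    · rw [if_neg hq] at h
      rcases ih _ _ h with h' | h'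
      · rcases List.mem_cons.mp h' with h'' | h''
        · exact Or.inr ⟨n % 10, Nat.mod_lt _ (by norm_num), h''⟩
        · exact Or.inl h''
      · exact Or.inr h'

lemma ofChars_digitChar : ∀ k, k < 10 →
    PySem.Int.ofChars? [Nat.digitChar k] = some (k : Int) := by decide

-- the digit values both ports map str(num) to are between 0 and 9 (num ≥ 0)
lemma digits_bounded (num : Int) (hnum : 0 ≤ num) :
    ∀ d ∈ (PySem.Int.toChars num).map (fun c => (PySem.Int.ofChars? [c]).getD 0),
      0 ≤ d ∧ d ≤ 9 := by
  intro d hd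
  simp only [List.mem_map] at hd
  obtain ⟨c, hc, rfl⟩ := hd
  have : c ∈ Nat.toDigits 10 num.toNat := by
    simpa [PySem.Int.toChars, not_lt.mpr hnum] using hc
  rcases mem_toDigitsCore _ _ _ this with h | ⟨k, hk, rfl⟩
  · simp at h
  · rw [ofChars_digitChar k hk]
    simp only [Option.getD_some]
    constructor <;> omega

-- goA with a Nodup accumulator: succeeds iff the whole list is zero-free and duplicate-free
lemma goA_spec : ∀ (ds acc : List Int), acc.Nodup →
    goA ds acc = if (acc ++ ds).Nodup ∧ 0 ∉ ds then some (acc ++ ds) else none := by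
  intro ds
  induction ds with
  | nil => intro acc hacc; simp [goA, hacc]
  | cons d rest ih =>
    intro acc hacc
    simp only [goA]
    by_cases hd0 : d = 0
    · subst hd0
      simp
    · simp only [if_neg hd0]
      by_cases hmem : acc.contains d
      · rw [if_pos hmem]
        have hnot : ¬ (acc ++ d :: rest).Nodup := by
          simp only [List.contains_eq_mem, decide_eq_true_eq] at hmem
          intro hnd
          exact (List.nodup_append.mp hnd).2.2 d hmem d (List.mem_cons_self ..) rfl
        simp [hnot]
      · rw [if_neg hmem]
        simp only [List.contains_eq_mem, decide_eq_true_eq] at hmem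
        have hacc' : (acc ++ [d]).Nodup := by
          simp [List.nodup_append, hacc]
          intro x hx rfl; exact hmem hx
        rw [ih (acc ++ [d]) hacc']
        have hl : acc ++ [d] ++ rest = acc ++ d :: rest := by simp
        rw [hl]
        by_cases hn : (acc ++ d :: rest).Nodup ∧ 0 ∉ rest
        · rw [if_pos hn, if_pos ⟨hn.1, by
            simp only [List.mem_cons, not_or]
            exact ⟨fun h => hd0 h.symm, hn.2⟩⟩]
        · rw [if_neg hn, if_neg (by
            rintro ⟨h1, h2⟩
            exact hn ⟨h1, fun h => h2 (List.mem_cons_of_mem _ h)⟩)]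

-- the crux: for a list of values in 0..9, "nodup, zero-free and each of 1..9 occurs once"
-- is the same as "sorted(ds) = [1..9]"
lemma key_iff (ds : List Int) (hb : ∀ d ∈ ds, 0 ≤ d ∧ d ≤ 9) :
    ((ds.Nodup ∧ 0 ∉ ds) ∧ ∀ d ∈ PySem.List.pyRange 1 10 1, List.count d ds = 1)
    ↔ PySem.List.sorted ds (fun x => x) false = PySem.List.pyRange 1 10 1 := by
  have hR : PySem.List.pyRange 1 10 1 = [1,2,3,4,5,6,7,8,9] := by decide
  rw [hR]
  constructor
  · rintro ⟨⟨hnd, h0⟩, hcnt⟩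
    apply PySem.List.sorted_eq_of_perm_of_pairwise_lt
    · rw [List.perm_iff_count]
      intro a
      by_cases ha : a ∈ ([1,2,3,4,5,6,7,8,9] : List Int)
      · rw [List.count_eq_one_of_mem (by decide) ha, hcnt a ha]
      · rw [List.count_eq_zero.mpr ha, List.count_eq_zero.mpr]
        intro hmem
        rcases hb a hmem with ⟨h1, h2⟩
        have : a ≠ 0 := fun h => h0 (h ▸ hmem)
        apply ha
        simp only [List.mem_cons, List.not_mem_nil, or_false]
        omega
    · decide
  · intro hs
    have hperm : ds.Perm ([1,2,3,4,5,6,7,8,9] : List Int) :=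
      (PySem.List.sorted_perm ds (fun x => x) false).symm.trans (hs ▸ List.Perm.refl _)
    refine ⟨⟨hperm.nodup_iff.mpr (by decide), ?_⟩, ?_⟩
    · intro h0
      have := hperm.mem_iff.mp h0
      simp at this
    · intro d hd
      rw [List.perm_iff_count.mp hperm d]
      exact List.count_eq_one_of_mem (by decide) hd

-- ===== VERDICT (by name: the statement is the Claim_ definition above) =====
theorem containsAllDigitsOnce_spec : Claim_equal_containsAllDigitsOnce := by
  intro num _ hpre
  unfold Spec_containsAllDigitsOnce containsAllDigitsOnce containsAllDigitsOnce_alt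
  set ds := (PySem.Int.toChars num).map (fun c => (PySem.Int.ofChars? [c]).getD 0) with hds
  have hb := digits_bounded num hpre
  rw [goA_spec ds [] (by simp)]
  simp only [List.nil_append]
  by_cases hc : ds.Nodup ∧ 0 ∉ ds
  · rw [if_pos hc]
    by_cases hcnt : ∀ d ∈ PySem.List.pyRange 1 10 1, List.count d ds = 1
    · have := (key_iff ds hb).mp ⟨hc, hcnt⟩
      rw [this]
      simp only [beq_self_eq_true]
      simp only [List.all_eq_true]
      intro d hd
      simp [PySem.List.count_eq, hcnt d hd]
    · have hne : PySem.List.sorted ds (fun x => x) false ≠ PySem.List.pyRange 1 10 1 :=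
        fun h => hcnt (((key_iff ds hb).mpr h).2)
      rw [beq_eq_false_iff_ne.mpr hne]
      simp only [not_forall, Classical.not_imp] at hcnt
      obtain ⟨d, hd, hcd⟩ := hcnt
      refine List.all_eq_false.mpr ⟨d, hd, ?_⟩
      simp [PySem.List.count_eq, hcd]
  · rw [if_neg hc]
    have hne : PySem.List.sorted ds (fun x => x) false ≠ PySem.List.pyRange 1 10 1 :=
      fun h => hc ((key_iff ds hb).mpr h).1
    rw [beq_eq_false_iff_ne.mpr hne]
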